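-- pv_equiv track=rewrite | github.com/xide-projext/yeonjeonng_blog_analyzer_prototype | backend/seo_service/analyzer.py | _calculate_hierarchy_score
-- ===== SOURCE A (Python) =====
-- from typing import Any, Dict, List, Optional, Tuple
--
-- def _calculate_hierarchy_score(headings: List[Dict]) -> int:
--     """Calculate heading hierarchy score."""
--     if not headings:
--         return 0
--
--     score = 0
--
--     # Check for logical hierarchy
--     levels = [h["level"] for h in headings]
--
--     # H1 should come first
--     if levels and levels[0] == 1:
--         score += 30
--
--     # No skipped levels
--     unique_levels = sorted(set(levels))
--     if all(unique_levels[i] - unique_levels[i-1] <= 1 for i in range(1, len(unique_levels))):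
--         score += 40
--
--     # Good distribution
--     if len(unique_levels) >= 2:
--         score += 30
--
--     return score
-- ===== SOURCE B (Python) =====
-- from typing import Any, Dict, List, Optional, Tuple
--
-- def _calculate_hierarchy_score(headings: List[Dict]) -> int:
--     """Score heading hierarchy: closed-form span-vs-cardinality test instead of a sorted pairwise gap scan."""
--     if not headings:
--         return 0
--     levels = {h["level"] for h in headings}
--     score = 30 if headings[0]["level"] == 1 else 0
--     if max(levels) - min(levels) + 1 == len(levels):
--         score += 40
--     if len(levels) >= 2:
--         score += 30
--     return score
-- ===== Notes on version B (the rewrite author's own statement) =====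
-- stated objective: simpler
-- what changed: Replaces the sort plus index-based consecutive-gap scan over the unique levels with a single set comprehension and the closed-form arithmetic test max - min + 1 == len(set), removing the sort and the explicit loop.
import Mathlib
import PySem

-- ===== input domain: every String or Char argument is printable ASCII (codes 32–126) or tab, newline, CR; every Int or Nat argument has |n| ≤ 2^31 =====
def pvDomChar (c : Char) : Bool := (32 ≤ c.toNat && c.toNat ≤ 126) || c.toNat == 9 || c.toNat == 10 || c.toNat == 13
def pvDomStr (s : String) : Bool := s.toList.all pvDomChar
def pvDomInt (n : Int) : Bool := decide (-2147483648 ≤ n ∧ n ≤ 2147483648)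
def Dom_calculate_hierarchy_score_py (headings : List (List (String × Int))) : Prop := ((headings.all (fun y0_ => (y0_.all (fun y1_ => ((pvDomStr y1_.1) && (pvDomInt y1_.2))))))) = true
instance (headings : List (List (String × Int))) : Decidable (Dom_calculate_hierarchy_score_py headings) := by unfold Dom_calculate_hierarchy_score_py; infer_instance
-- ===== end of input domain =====

-- B replaces A's sort + index-based consecutive-gap scan over the unique levels by the
-- closed-form test max(levels) - min(levels) + 1 == len(levels) on a set built in one pass.

-- ===== PORT A =====
def calculate_hierarchy_score_py (headings : List (List (String × Int))) : Int :=
  if headings = [] then 0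
  else
    let score : Int := 0
    -- levels = [h["level"] for h in headings]   (KeyError excluded by Pre_)
    let levels : List Int := headings.map (fun h => PySem.Dict.getD (PySem.Dict.mk h) "level" 0)
    -- if levels and levels[0] == 1: score += 30   (levels[0] guarded by 'levels' being nonempty)
    let score := if levels ≠ [] ∧ PySem.List.pyGetD levels 0 0 = 1 then score + 30 else score
    -- unique_levels = sorted(set(levels))
    let unique_levels : List Int := PySem.List.sorted (PySem.Set.ofList levels) (fun x => x) false
    -- if all(unique_levels[i] - unique_levels[i-1] <= 1 for i in range(1, len(unique_levels))): score += 40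
    let score := if (PySem.List.pyRange 1 (unique_levels.length : Int) 1).all
        (fun i => decide (PySem.List.pyGetD unique_levels i 0 - PySem.List.pyGetD unique_levels (i - 1) 0 ≤ 1))
      then score + 40 else score
    -- if len(unique_levels) >= 2: score += 30
    let score := if unique_levels.length ≥ 2 then score + 30 else score
    score

-- ===== PORT B =====
def calculate_hierarchy_score_py_alt (headings : List (List (String × Int))) : Int :=
  match headings with
  | [] => 0
  | h0 :: _ =>
    -- levels = {h["level"] for h in headings}
    let levels : PySem.Set Int := PySem.Set.ofList (headings.map (fun h => PySem.Dict.getD (PySem.Dict.mk h) "level" 0))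
    -- score = 30 if headings[0]["level"] == 1 else 0
    let score : Int := if PySem.Dict.getD (PySem.Dict.mk h0) "level" 0 = 1 then 30 else 0
    -- if max(levels) - min(levels) + 1 == len(levels): score += 40   (levels nonempty here)
    let score := if (PySem.List.max? levels (fun x => x)).getD 0 - (PySem.List.min? levels (fun x => x)).getD 0 + 1 = (levels.length : Int)
      then score + 40 else score
    -- if len(levels) >= 2: score += 30
    if levels.length ≥ 2 then score + 30 else score

-- ===== PRECONDITION & SPEC =====
-- Pre_ excludes exactly the inputs where some heading dict has no "level" key: there Python's
-- h["level"] raises KeyError.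
def Pre_calculate_hierarchy_score_py (headings : List (List (String × Int))) : Prop :=
  ∀ h ∈ headings, PySem.Dict.contains (PySem.Dict.mk h) "level" = true
instance (headings : List (List (String × Int))) : Decidable (Pre_calculate_hierarchy_score_py headings) := by unfold Pre_calculate_hierarchy_score_py; infer_instance
def pvWitness_calculate_hierarchy_score_py : (List (List (String × Int))) := [[("level", 1)], [("level", 2)], [("level", 3)], [("level", 2)]]

def Spec_calculate_hierarchy_score_py (headings : List (List (String × Int))) (out : Int) : Prop := out = calculate_hierarchy_score_py_alt headings
instance (headings : List (List (String × Int))) (out : Int) : Decidable (Spec_calculate_hierarchy_score_py headings out) := by unfold Spec_calculate_hierarchy_score_py; infer_instance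

-- ===== CLAIM (what is proved, stated in full; the proofs are below) =====
def Claim_equal_calculate_hierarchy_score_py : Prop := ∀ (headings : List (List (String × Int))), Dom_calculate_hierarchy_score_py headings → Pre_calculate_hierarchy_score_py headings → Spec_calculate_hierarchy_score_py headings (calculate_hierarchy_score_py headings)

-- ===== LEMMAS AND PROOFS =====

-- In a strictly increasing chain, the last element is at least head + length of the tail.
lemma chain_lt_getLast_ge (h : Int) (t : List Int) (hc : List.IsChain (· < ·) (h :: t)) :
    h + t.length ≤ (h :: t).getLast (by simp) := by
  induction t generalizing h with
  | nil => simp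
  | cons h2 t ih =>
    have hc' : List.IsChain (· < ·) (h2 :: t) := hc.of_cons
    have hlt : h < h2 := List.rel_of_isChain_cons_cons hc
    have := ih h2 hc'
    rw [List.getLast_cons (by simp)]
    simp only [List.length_cons]
    push_cast
    omega

-- Consecutive-gaps-≤-1 on a strictly increasing nonempty chain is exactly "span = head + length - 1".
lemma chain_le_one_iff (h : Int) (t : List Int) (hc : List.IsChain (· < ·) (h :: t)) :
    List.IsChain (fun a b => b - a ≤ 1) (h :: t) ↔ (h :: t).getLast (by simp) = h + t.length := by
  induction t generalizing h with
  | nil => simp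
  | cons h2 t ih =>
    have hc' : List.IsChain (· < ·) (h2 :: t) := hc.of_cons
    have hlt : h < h2 := List.rel_of_isChain_cons_cons hc
    have ihh := ih h2 hc'
    have hge := chain_lt_getLast_ge h2 t hc'
    rw [List.getLast_cons (by simp)]
    constructor
    · intro hch
      have h21 : h2 - h ≤ 1 := List.rel_of_isChain_cons_cons (R := fun a b => b - a ≤ 1) hch
      have := ihh.mp hch.of_cons
      simp only [List.length_cons] at this ⊢
      push_cast at this ⊢
      omega
    · intro hl
      have heq : h2 = h + 1 := by simp only [List.length_cons] at hl hge ⊢; push_cast at hl hge ⊢; omega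
      have htail : (h2 :: t).getLast (by simp) = h2 + t.length := by simp only [List.length_cons] at hl ⊢; push_cast at hl ⊢; omega
      exact List.isChain_cons_cons.mpr ⟨by omega, ihh.mpr htail⟩

-- In a (· ≤ ·)-pairwise list, every element is at most the last.
lemma pairwise_le_getLast (u : List Int) (hp : u.Pairwise (· ≤ ·)) (hne : u ≠ []) :
    ∀ y ∈ u, y ≤ u.getLast hne := by
  induction u with
  | nil => simp at hne
  | cons a t ih =>
    intro y hy
    cases t with
    | nil => simp at hy; simp [hy]
    | cons b t' =>
      rw [List.getLast_cons (by simp)]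
      rcases List.mem_cons.mp hy with rfl | hyt
      · exact le_trans (List.rel_of_pairwise_cons hp (List.getLast_mem _)) (le_refl _)
      · exact ih hp.tail (by simp) y hyt

-- The two gap tests agree: A's all-over-range on sorted(set(ls)) equals B's span test on set(ls).
lemma gap_tests_agree (ls : List Int) (hne : ls ≠ []) :
    ((PySem.List.pyRange 1 ((PySem.List.sorted (PySem.Set.ofList ls) (fun x => x) false).length : Int) 1).all
        (fun i => decide (PySem.List.pyGetD (PySem.List.sorted (PySem.Set.ofList ls) (fun x => x) false) i 0
            - PySem.List.pyGetD (PySem.List.sorted (PySem.Set.ofList ls) (fun x => x) false) (i - 1) 0 ≤ 1)) = true)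
    ↔ ((PySem.List.max? (PySem.Set.ofList ls) (fun x => x)).getD 0
        - (PySem.List.min? (PySem.Set.ofList ls) (fun x => x)).getD 0 + 1
        = ((PySem.Set.ofList ls : List Int).length : Int)) := by
  set s : List Int := PySem.Set.ofList ls with hs
  set u : List Int := PySem.List.sorted s (fun x => x) false with hu
  have hperm : u.Perm s := PySem.List.sorted_perm s (fun x => x) false
  have hsne : s ≠ [] := by
    cases ls with
    | nil => exact absurd rfl hne
    | cons a t => simp [hs, PySem.Set.ofList_cons]
  have hune : u ≠ [] := by
    intro h0; exact hsne ((h0 ▸ hperm).symm.eq_nil)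
  have hlen : u.length = s.length := hperm.length_eq
  have hpw : u.Pairwise (· ≤ ·) := PySem.List.sorted_pairwise s (fun x => x)
  have hnd : u.Nodup := hperm.nodup_iff.mpr (PySem.Set.nodup_ofList ls)
  have hplt : u.Pairwise (· < ·) := (hpw.and hnd).imp (fun hab => lt_of_le_of_ne hab.1 hab.2)
  obtain ⟨h, t, hut⟩ := List.exists_cons_of_ne_nil hune
  have hchain : List.IsChain (· < ·) u := hplt.isChain
  -- head of u is min? of s, last of u is max? of s
  have hmin : (PySem.List.min? s (fun x => x)).getD 0 = h := by
    obtain ⟨m, hm⟩ : ∃ m, PySem.List.min? s (fun x => x) = some m := by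
      cases hmm : PySem.List.min? s (fun x => x) with
      | none => exact absurd ((PySem.List.min?_eq_none_iff _ _).mp hmm) hsne
      | some m => exact ⟨m, rfl⟩
    have hmem : m ∈ s := PySem.List.min?_mem hm
    have h1 : h ≤ m := PySem.List.key_head_sorted_le s (fun x => x) (hu ▸ hut) m hmem
    have h2 : m ≤ h := PySem.List.min?_isMin hm h (hperm.mem_iff.mp (hut ▸ List.mem_cons_self))
    rw [hm]; simp; omega
  have hmax : (PySem.List.max? s (fun x => x)).getD 0 = u.getLast hune := by
    obtain ⟨m, hm⟩ : ∃ m, PySem.List.max? s (fun x => x) = some m := by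
      cases hmm : PySem.List.max? s (fun x => x) with
      | none => exact absurd ((PySem.List.max?_eq_none_iff _ _).mp hmm) hsne
      | some m => exact ⟨m, rfl⟩
    have hmem : m ∈ s := PySem.List.max?_mem hm
    have h1 : m ≤ u.getLast hune := pairwise_le_getLast u hpw hune m (hperm.mem_iff.mpr hmem)
    have h2 : u.getLast hune ≤ m := PySem.List.max?_isMax hm _ (hperm.mem_iff.mp (List.getLast_mem hune))
    rw [hm]; simp; omega
  -- A's all over pyRange is the gap chain on u
  have hall : ((PySem.List.pyRange 1 (u.length : Int) 1).all
      (fun i => decide (PySem.List.pyGetD u i 0 - PySem.List.pyGetD u (i - 1) 0 ≤ 1)) = true)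
      ↔ List.IsChain (fun a b => b - a ≤ 1) u := by
    rw [List.all_eq_true, List.isChain_iff_getElem]
    constructor
    · intro hA j hj
      have hmem : ((j : Int) + 1) ∈ PySem.List.pyRange 1 (u.length : Int) 1 := by
        rw [PySem.List.mem_pyRange_one]; omega
      have := hA _ hmem
      rw [PySem.List.pyGetD_eq_getElem u 0 (by omega) (by omega),
          show ((j : Int) + 1 - 1) = (j : Int) by ring,
          PySem.List.pyGetD_eq_getElem u 0 (by omega) (by omega)] at this
      simp only [decide_eq_true_eq] at this
      have e1 : ((j : Int) + 1).toNat = j + 1 := by omega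
      have e2 : ((j : Int)).toNat = j := by omega
      simp only [e1, e2] at this
      omega
    · intro hC i hi
      rw [PySem.List.mem_pyRange_one] at hi
      have h1 : 1 ≤ i := hi.1
      have h2 : i < (u.length : Int) := hi.2
      have hj : (i - 1).toNat + 1 < u.length := by omega
      have := hC ((i - 1).toNat) hj
      rw [PySem.List.pyGetD_eq_getElem u 0 (by omega) (by omega),
          PySem.List.pyGetD_eq_getElem u 0 (by omega) (by omega)]
      have e1 : i.toNat = (i - 1).toNat + 1 := by omega
      simp only [e1]
      simp only [decide_eq_true_eq]
      omega
  rw [hall, hmin, hmax]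
  clear_value u
  subst hut
  rw [chain_le_one_iff h t hchain]
  simp only [List.length_cons] at hlen
  omega

-- ===== VERDICT (by name: the statement is the Claim_ definition above) =====
theorem calculate_hierarchy_score_py_spec : Claim_equal_calculate_hierarchy_score_py := by
  intro headings _ _
  unfold Spec_calculate_hierarchy_score_py
  unfold calculate_hierarchy_score_py calculate_hierarchy_score_py_alt
  cases headings with
  | nil => simp
  | cons h0 rest =>
    have hhead : PySem.List.pyGetD ((h0 :: rest).map (fun h => PySem.Dict.getD (PySem.Dict.mk h) "level" 0)) 0 0
        = PySem.Dict.getD (PySem.Dict.mk h0) "level" 0 := by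
      simp [PySem.List.pyGetD]
    have hgap := gap_tests_agree ((h0 :: rest).map (fun h => PySem.Dict.getD (PySem.Dict.mk h) "level" 0))
      (by simp)
    simp only [hgap, hhead, ne_eq, List.map_eq_nil_iff, List.cons_ne_nil, not_false_iff, true_and]
    simp only [PySem.List.length_sorted]
    split_ifs <;> first | exact (‹False›).elim | omega
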